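-- pv_equiv track=rewrite | github.com/yosuanicolaus/practice-python | codechef/stable_mex.py | solve
-- ===== SOURCE A (Python) =====
-- def create_contagious(arr):
--     blocks = []
--     a, b = 0, 1
--     while b < len(arr):
--         if arr[b] - arr[b - 1] == 1:
--             b += 1
--         else:
--             blocks.append(arr[a:b])
--             a = b
--             b += 1
--         if b == len(arr):
--             blocks.append(arr[a:b])
--     return blocks
--
-- def solve(A: list):
--     A = list(set(A))
--     A.sort()
--     if A[0] >= 1:
--         # MEX = 0
--         return A[0] - 1
--     elif A[0] == 0 and 1 not in A:
--         # MEX = 1 -> infinite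
--         return -1
--
--     # divide to group of contagious nums
--     blocks = create_contagious(A)
--     total_k = 0
--     MEX = blocks[0][-1] + 1
--
--     for i, nums in enumerate(blocks):
--         if i == 0:
--             continue
--
--         if len(nums) >= MEX - 1:
--             total_k += 1
--
--     return total_k
-- ===== SOURCE B (Python) =====
-- def solve(A: list):
--     A = sorted(set(A))
--     if A[0] >= 1:
--         # MEX = 0
--         return A[0] - 1
--     if A[0] == 0 and 1 not in A:
--         # MEX = 1 -> infinite
--         return -1
--
--     # single pass over consecutive pairs: track current run length,
--     # fix MEX when the first run ends, count later runs meeting the threshold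
--     total = 0
--     run_len = 1
--     mex = None
--     for prev, cur in zip(A, A[1:]):
--         if cur - prev == 1:
--             run_len += 1
--         else:
--             if mex is None:
--                 mex = prev + 1
--             else:
--                 if run_len >= mex - 1:
--                     total += 1
--             run_len = 1
--     if mex is None:
--         return 0
--     if run_len >= mex - 1:
--         total += 1
--     return total
-- ===== Notes on version B (the rewrite author's own statement) =====
-- stated objective: idiomatic
-- what changed: B never materializes the list of consecutive blocks: instead of the index/slice while-loop building blocks plus a second enumerate pass, it walks adjacent pairs of the sorted distinct values once, fixing MEX when the first run ends and counting later runs on the fly.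
import Mathlib
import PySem

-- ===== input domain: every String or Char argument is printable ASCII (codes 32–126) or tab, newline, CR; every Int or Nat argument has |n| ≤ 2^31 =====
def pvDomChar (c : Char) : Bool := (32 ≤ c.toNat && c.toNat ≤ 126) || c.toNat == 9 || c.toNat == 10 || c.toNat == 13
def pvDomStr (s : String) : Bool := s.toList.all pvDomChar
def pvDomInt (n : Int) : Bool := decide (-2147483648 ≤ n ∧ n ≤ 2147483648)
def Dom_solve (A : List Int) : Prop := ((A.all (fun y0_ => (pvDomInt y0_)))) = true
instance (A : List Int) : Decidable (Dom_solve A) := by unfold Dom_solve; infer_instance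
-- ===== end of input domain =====

-- B drops A's intermediate blocks list and second pass for one pass over adjacent pairs (idiomatic; same cost).

-- ===== PORT A =====
-- the while-loop of create_contagious; its indices stay in range (1 ≤ b ≤ len, a < b), so the getD reads are Python-exact
def ccGo (arr : List Int) (blocks : List (List Int)) (a b : Nat) : List (List Int) :=
  if h : b < arr.length then
    if arr.getD b 0 - arr.getD (b - 1) 0 = 1 then
      ccGo arr
        (if b + 1 = arr.length then
          blocks ++ [PySem.List.slice arr (some (a : Int)) (some ((b : Int) + 1))] else blocks)
        a (b + 1)
    else
      ccGo arr
        ((blocks ++ [PySem.List.slice arr (some (a : Int)) (some (b : Int))]) ++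
          (if b + 1 = arr.length then
            [PySem.List.slice arr (some (b : Int)) (some ((b : Int) + 1))] else []))
        b (b + 1)
  else blocks
termination_by arr.length - b

def createContagious (arr : List Int) : List (List Int) := ccGo arr [] 0 1

def solve (A : List Int) : Int :=
  let S := PySem.List.sorted (PySem.Set.ofList A) (fun x => x) false
  let a0 := S.headD 0          -- Python's head access: in range under Pre_solve
  if a0 ≥ 1 then a0 - 1
  else if a0 = 0 ∧ (1 : Int) ∉ S then -1
  else
    let blocks := createContagious S
    let mex := (blocks.headD []).getLastD 0 + 1   -- last element of the first block: in range under Pre_solve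
    (PySem.List.enumerate blocks).foldl
      (fun tk p => if p.1 = 0 then tk
        else if (p.2.length : Int) ≥ mex - 1 then tk + 1 else tk) 0

-- ===== PORT B =====
def solve_alt (A : List Int) : Int :=
  let S := PySem.List.sorted (PySem.Set.ofList A) (fun x => x) false
  let a0 := S.headD 0          -- Python's head access: in range under Pre_solve
  if a0 ≥ 1 then a0 - 1
  else if a0 = 0 ∧ (1 : Int) ∉ S then -1
  else
    let st := (S.zip (S.drop 1)).foldl
      (fun (st : Int × Int × Option Int) (pc : Int × Int) =>
        if pc.2 - pc.1 = 1 then (st.1, st.2.1 + 1, st.2.2)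
        else
          match st.2.2 with
          | none => (st.1, 1, some (pc.1 + 1))
          | some m => ((if st.2.1 ≥ m - 1 then st.1 + 1 else st.1), 1, some m))
      (0, 1, none)
    match st.2.2 with
    | none => 0
    | some m => if st.2.1 ≥ m - 1 then st.1 + 1 else st.1

-- ===== PRECONDITION & SPEC =====
-- Pre_ excludes exactly the inputs where A raises IndexError: the empty list (the head access
-- fails) and lists whose elements are all one repeated negative value, where A indexes into an
-- empty blocks list.
def Pre_solve (A : List Int) : Prop :=
  A ≠ [] ∧ (0 ≤ A.headD 0 ∨ ¬ ∀ x ∈ A, x = A.headD 0)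
instance (A : List Int) : Decidable (Pre_solve A) := by unfold Pre_solve; infer_instance

def pvWitness_solve : List Int := [0, 1]

def Spec_solve (A : List Int) (out : Int) : Prop := out = solve_alt A
instance (A : List Int) (out : Int) : Decidable (Spec_solve A out) := by unfold Spec_solve; infer_instance

-- ===== CLAIM (what is proved, stated in full; the proofs are below) =====
def Claim_equal_solve : Prop := ∀ (A : List Int), Dom_solve A → Pre_solve A → Spec_solve A (solve A)

-- ===== LEMMAS AND PROOFS =====

-- maximal runs of consecutive integers, structurally (the common reference shape)
def runsGo (prev : Int) (cur : List Int) : List Int → List (List Int)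
  | [] => [cur]
  | y :: ys => if y - prev = 1 then runsGo y (cur ++ [y]) ys else cur :: runsGo y [y] ys

-- A's counting loop over a list of blocks
def foldCount (rs : List (List Int)) (m t : Int) : Int :=
  rs.foldl (fun tk nums => if (nums.length : Int) ≥ m - 1 then tk + 1 else tk) t

-- B's fold step and final read-out
def stepB (st : Int × Int × Option Int) (pc : Int × Int) : Int × Int × Option Int :=
  if pc.2 - pc.1 = 1 then (st.1, st.2.1 + 1, st.2.2)
  else
    match st.2.2 with
    | none => (st.1, 1, some (pc.1 + 1))
    | some m => ((if st.2.1 ≥ m - 1 then st.1 + 1 else st.1), 1, some m)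

def resB (st : Int × Int × Option Int) : Int :=
  match st.2.2 with
  | none => 0
  | some m => if st.2.1 ≥ m - 1 then st.1 + 1 else st.1

theorem enum_fold_count (m : Int) : ∀ (rs : List (List Int)) (s t : Int), 1 ≤ s →
    (PySem.List.enumerate rs s).foldl
      (fun tk p => if p.1 = 0 then tk
        else if (p.2.length : Int) ≥ m - 1 then tk + 1 else tk) t = foldCount rs m t := by
  intro rs
  induction rs with
  | nil => intro s t _; simp [PySem.List.enumerate_nil, foldCount]
  | cons r rest ih =>
    intro s t hs
    rw [PySem.List.enumerate_cons]
    simp only [List.foldl_cons]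
    have h0 : ¬ (s = 0) := by omega
    rw [if_neg h0, foldCount, List.foldl_cons, ← foldCount]
    exact ih (s+1) _ (by omega)

theorem enum_fold_all (m : Int) (blocks : List (List Int)) :
    (PySem.List.enumerate blocks).foldl
      (fun tk p => if p.1 = 0 then tk
        else if (p.2.length : Int) ≥ m - 1 then tk + 1 else tk) 0 = foldCount blocks.tail m 0 := by
  cases blocks with
  | nil => simp [PySem.List.enumerate_nil, foldCount]
  | cons r rest =>
    rw [PySem.List.enumerate, List.foldl_cons, if_pos rfl]
    have := enum_fold_count m rest (0+1) 0 (by omega)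
    simpa using this

theorem zipfold_phase2 : ∀ (l : List Int) (prev m total : Int) (cur : List Int),
    resB (((prev :: l).zip l).foldl stepB (total, (cur.length : Int), some m)) =
      foldCount (runsGo prev cur l) m total := by
  intro l
  induction l with
  | nil => intro prev m total cur; simp [resB, foldCount, runsGo]
  | cons y ys ih =>
    intro prev m total cur
    rw [List.zip_cons_cons, List.foldl_cons]
    by_cases hd : y - prev = 1
    · rw [runsGo, if_pos hd]
      have : stepB (total, (cur.length : Int), some m) (prev, y)
          = (total, ((cur ++ [y]).length : Int), some m) := by
        simp [stepB, hd]
      rw [this]; exact ih y m total (cur ++ [y])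
    · rw [runsGo, if_neg hd]
      have : stepB (total, (cur.length : Int), some m) (prev, y)
          = ((if (cur.length : Int) ≥ m - 1 then total + 1 else total),
              (([y] : List Int).length : Int), some m) := by
        simp [stepB, hd]
      rw [this, ih y m _ [y]]
      simp [foldCount]

theorem zipfold_phase1 : ∀ (l : List Int) (prev : Int) (cur : List Int),
    cur.getLastD 0 = prev →
    resB (((prev :: l).zip l).foldl stepB (0, (cur.length : Int), none)) =
      foldCount ((runsGo prev cur l).tail) (((runsGo prev cur l).headD []).getLastD 0 + 1) 0 := by
  intro l
  induction l with
  | nil => intro prev cur _; simp [resB, foldCount, runsGo]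
  | cons y ys ih =>
    intro prev cur hlast
    rw [List.zip_cons_cons, List.foldl_cons]
    by_cases hd : y - prev = 1
    · rw [runsGo, if_pos hd]
      have : stepB (0, (cur.length : Int), none) (prev, y)
          = (0, ((cur ++ [y]).length : Int), none) := by
        simp [stepB, hd]
      rw [this]
      exact ih y (cur ++ [y]) (by simp)
    · rw [runsGo, if_neg hd]
      have : stepB (0, (cur.length : Int), none) (prev, y)
          = (0, (([y] : List Int).length : Int), some (prev + 1)) := by
        simp [stepB, hd]
      rw [this, zipfold_phase2 ys y (prev + 1) 0 [y]]
      rw [List.getLastD_eq_getLast?] at hlast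
      simp [hlast]

theorem slice_snoc (arr : List Int) (a b : Nat) (hab : a ≤ b) (hb : b < arr.length) :
    PySem.List.slice arr (some (a : Int)) (some ((b : Int) + 1)) =
      PySem.List.slice arr (some (a : Int)) (some (b : Int)) ++ [arr.getD b 0] := by
  have h1 : ((b : Int) + 1) = ((b + 1 : Nat) : Int) := by push_cast; ring
  rw [h1, PySem.List.slice_natCast, PySem.List.slice_natCast]
  have h2 : b + 1 - a = (b - a) + 1 := by omega
  rw [h2, List.take_add_one]
  congr 1
  have h3 : (arr.drop a)[b - a]? = arr[b]? := by
    rw [List.getElem?_drop]; congr 1; omega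
  rw [h3, List.getElem?_eq_getElem hb]
  simp [List.getD_eq_getElem?_getD, List.getElem?_eq_getElem hb]

theorem slice_single (arr : List Int) (b : Nat) (hb : b < arr.length) :
    PySem.List.slice arr (some (b : Int)) (some ((b : Int) + 1)) = [arr.getD b 0] := by
  rw [slice_snoc arr b b le_rfl hb, PySem.List.slice_natCast]
  simp

theorem ccGo_eq_runsGo (arr : List Int) : ∀ (n b : Nat), arr.length - b = n →
    1 ≤ b → b < arr.length → ∀ (a : Nat) (blocks : List (List Int)), a < b →
    ccGo arr blocks a b =
      blocks ++ runsGo (arr.getD (b - 1) 0)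
        (PySem.List.slice arr (some (a : Int)) (some (b : Int))) (arr.drop b) := by
  intro n
  induction n with
  | zero => intro b hn _ hb; omega
  | succ n ih =>
    intro b hn hb1 hb a blocks hab
    have hdrop : arr.drop b = arr.getD b 0 :: arr.drop (b + 1) := by
      rw [List.drop_eq_getElem_cons hb, List.getD_eq_getElem arr 0 hb]
    rw [ccGo, dif_pos hb, hdrop, runsGo]
    by_cases hd : arr.getD b 0 - arr.getD (b - 1) 0 = 1
    · rw [if_pos hd, if_pos hd]
      by_cases hlen : b + 1 = arr.length
      · rw [if_pos hlen]
        have hstop : ccGo arr (blocks ++ [PySem.List.slice arr (some (a:Int)) (some ((b:Int)+1))]) a (b+1) =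
            blocks ++ [PySem.List.slice arr (some (a:Int)) (some ((b:Int)+1))] := by
          rw [ccGo]; simp [hlen]
        rw [hstop]
        have hd2 : arr.drop (b+1) = [] := by rw [hlen]; simp
        rw [hd2, runsGo, slice_snoc arr a b (by omega) hb]
      · rw [if_neg hlen]
        have := ih (b+1) (by omega) (by omega) (by omega) a blocks (by omega)
        simp only [Nat.add_sub_cancel] at this
        rw [this]
        have hcast : ((b+1:Nat):Int) = ((b:Int)+1) := by push_cast; ring
        rw [hcast, slice_snoc arr a b (by omega) hb]
    · rw [if_neg hd, if_neg hd]
      by_cases hlen : b + 1 = arr.length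
      · rw [if_pos hlen]
        have hstop : ∀ bl, ccGo arr bl b (b+1) = bl := by
          intro bl; rw [ccGo]; simp [hlen]
        rw [hstop]
        have hd2 : arr.drop (b+1) = [] := by rw [hlen]; simp
        rw [hd2, runsGo, slice_single arr b hb]
        simp
      · rw [if_neg hlen]
        have hsingle : PySem.List.slice arr (some (b:Int)) (some ((b+1:Nat):Int)) = [arr.getD b 0] := by
          have h1 : ((b+1:Nat):Int) = ((b:Int)+1) := by push_cast; ring
          rw [h1]; exact slice_single arr b hb
        have := ih (b+1) (by omega) (by omega) (by omega) b
          ((blocks ++ [PySem.List.slice arr (some (a:Int)) (some (b:Int))]) ++ []) (by omega)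
        simp only [Nat.add_sub_cancel, List.append_nil] at this
        rw [List.append_nil, this, hsingle]
        simp

-- sorted(set(A)) has at least two elements on the else branch, under Pre_solve
theorem sorted_set_two (A : List Int) (hpre : Pre_solve A)
    (h1 : ¬ ((PySem.List.sorted (PySem.Set.ofList A) (fun x => x) false).headD 0 ≥ 1))
    (h2 : ¬ ((PySem.List.sorted (PySem.Set.ofList A) (fun x => x) false).headD 0 = 0 ∧
      (1 : Int) ∉ PySem.List.sorted (PySem.Set.ofList A) (fun x => x) false)) :
    2 ≤ (PySem.List.sorted (PySem.Set.ofList A) (fun x => x) false).length := by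
  obtain ⟨hne, hpre2⟩ := hpre
  set S := PySem.List.sorted (PySem.Set.ofList A) (fun x => x) false with hS
  have hmem : ∀ z : Int, z ∈ S ↔ z ∈ A := by
    intro z
    rw [hS, PySem.List.mem_sorted, PySem.Set.mem_ofList]
  obtain ⟨ha0, At, hA⟩ : ∃ a0 At, A = a0 :: At := by
    cases A with
    | nil => exact absurd rfl hne
    | cons a t => exact ⟨a, t, rfl⟩
  have hSne : S ≠ [] := by
    intro h
    have := (hmem ha0).2 (by rw [hA]; exact List.mem_cons_self ..)
    rw [h] at this
    exact absurd this (List.not_mem_nil)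
  by_contra hlt
  obtain ⟨s, hS1⟩ : ∃ s, S = [s] := by
    cases hSs : S with
    | nil => exact absurd hSs hSne
    | cons s t =>
      cases ht : t with
      | nil => exact ⟨s, by simp [ht] at hSs; simpa [ht] using hSs⟩
      | cons u v => rw [hSs, ht] at hlt; simp at hlt
  have hall : ∀ x ∈ A, x = s := by
    intro x hx
    have := (hmem x).2 hx
    rw [hS1] at this
    simpa using this
  have hhead : A.headD 0 = s := by
    rw [hA]
    exact hall ha0 (by rw [hA]; exact List.mem_cons_self ..)
  rw [hS1] at h1 h2
  simp only [List.headD_cons] at h1 h2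
  rcases hpre2 with hp | hp
  · rw [hhead] at hp
    have hs0 : s = 0 := by omega
    apply h2
    refine ⟨hs0, ?_⟩
    rw [hs0]
    simp
  · exact hp (fun x hx => by rw [hhead]; exact hall x hx)

-- ===== VERDICT (by name: the statement is the Claim_ definition above) =====
theorem solve_spec : Claim_equal_solve := by
  intro A _ hpre
  unfold Spec_solve solve solve_alt
  set S := PySem.List.sorted (PySem.Set.ofList A) (fun x => x) false with hS
  by_cases h1 : S.headD 0 ≥ 1
  · simp only [if_pos h1]
  · simp only [if_neg h1]
    by_cases h2 : S.headD 0 = 0 ∧ (1 : Int) ∉ S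
    · simp only [if_pos h2]
    · simp only [if_neg h2]
      have hlen : 2 ≤ S.length := sorted_set_two A hpre h1 h2
      obtain ⟨x, y, t, hxyt⟩ : ∃ x y t, S = x :: y :: t := by
        cases hSs : S with
        | nil => rw [hSs] at hlen; simp at hlen
        | cons x u =>
          cases hu : u with
          | nil => rw [hSs, hu] at hlen; simp at hlen
          | cons y v => exact ⟨x, y, v, by first | rfl | rw [hSs, hu] | (rw [hu] at hSs; exact hSs)⟩
      -- A side: blocks are the runs
      have hblocks : createContagious S = runsGo x [x] (y :: t) := by
        rw [createContagious]
        have h01 : (1 : Nat) < S.length := by omega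
        have hcc := ccGo_eq_runsGo S (S.length - 1) 1 rfl le_rfl h01 0 [] (by omega)
        rw [hcc, hxyt]
        simp only [List.nil_append, List.drop_succ_cons, List.drop_zero, Nat.cast_zero, Nat.cast_one, PySem.List.slice_zero_start]
        rw [PySem.List.slice_to (x :: y :: t) (b := 1) (by norm_num)]
        simp
      rw [hblocks]
      rw [enum_fold_all (((runsGo x [x] (y :: t)).headD []).getLastD 0 + 1) (runsGo x [x] (y :: t))]
      conv_rhs => rw [hxyt]
      show foldCount ((runsGo x [x] (y :: t)).tail)
          (((runsGo x [x] (y :: t)).headD []).getLastD 0 + 1) 0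
        = resB (((x :: y :: t).zip (y :: t)).foldl stepB (0, (([x] : List Int).length : Int), none))
      exact (zipfold_phase1 (y :: t) x [x] (by simp)).symm
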